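-- pv_equiv track=rewrite | github.com/Deepak5113/gfg-potd | 08.August/09.Maximize Array Value After Rearrangement.py | Maximize
-- ===== SOURCE A (Python) =====
-- def Maximize(arr):
--     # Complete the function
--     MOD = 10**9 + 7
--     arr.sort()
--     max_value = 0
--
--     for i in range(len(arr)):
--         max_value += arr[i] * i
--         max_value %= MOD
--     return max_value
-- ===== SOURCE B (Python) =====
-- def Maximize(arr):
--     MOD = 10**9 + 7
--     arr.sort()
--     suffix = 0
--     ans = 0
--     # arr[i] is counted i times, so the answer is the sum of all proper suffix
--     # sums: walk the sorted list back to front, adding the running suffix sum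
--     # (as it stood BEFORE the current element) into ans at each step.
--     for v in reversed(arr):
--         ans = (ans + suffix) % MOD
--         suffix = (suffix + v) % MOD
--     return ans
-- ===== Notes on version B (the rewrite author's own statement) =====
-- stated objective: alternative
-- what changed: Instead of an index loop multiplying each sorted element by its position, B walks the sorted list in reverse maintaining a running suffix sum and adds it into the answer each step (arr[i] is counted i times, so the answer is the sum of all proper suffix sums); both sort arr in place.
import Mathlib
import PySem

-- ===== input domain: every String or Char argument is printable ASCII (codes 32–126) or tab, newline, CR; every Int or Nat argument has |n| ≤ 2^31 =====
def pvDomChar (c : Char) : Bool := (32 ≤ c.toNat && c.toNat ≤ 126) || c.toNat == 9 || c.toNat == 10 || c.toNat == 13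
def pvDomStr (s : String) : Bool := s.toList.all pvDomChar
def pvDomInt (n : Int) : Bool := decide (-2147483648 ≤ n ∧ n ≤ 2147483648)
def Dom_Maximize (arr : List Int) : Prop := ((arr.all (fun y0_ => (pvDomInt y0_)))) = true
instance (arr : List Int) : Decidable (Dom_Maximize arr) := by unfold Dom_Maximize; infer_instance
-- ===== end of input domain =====

-- B walks the sorted list in reverse with a running suffix sum instead of multiplying by indices;
-- equivalence is about the RETURN value (both Pythons sort arr in place identically).

-- ===== PORT A =====
def Maximize (arr : List Int) : Int :=
  let s := PySem.List.sorted arr (fun x => x) false   -- arr.sort()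
  (PySem.List.pyRange 0 (PySem.List.len s) 1).foldl
    (fun mv i => PySem.Int.mod (mv + PySem.List.pyGetD s i 0 * i) 1000000007) 0
    -- index i is always in range, so pyGetD's default is never used

-- ===== PORT B =====
-- 'for v in reversed(arr): ans = (ans+suffix)%MOD; suffix = (suffix+v)%MOD'
def maximizeGo : List Int → Int → Int → Int
  | [], _, ans => ans
  | v :: rest, suffix, ans =>
      maximizeGo rest (PySem.Int.mod (suffix + v) 1000000007)
        (PySem.Int.mod (ans + suffix) 1000000007)

def Maximize_alt (arr : List Int) : Int :=
  let s := PySem.List.sorted arr (fun x => x) false   -- arr.sort()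
  maximizeGo s.reverse 0 0

-- ===== PRECONDITION & SPEC =====
def Spec_Maximize (arr : List Int) (out : Int) : Prop := out = Maximize_alt arr
instance (arr : List Int) (out : Int) : Decidable (Spec_Maximize arr out) := by unfold Spec_Maximize; infer_instance

-- ===== CLAIM (what is proved, stated in full; the proofs are below) =====
def Claim_equal_Maximize : Prop := ∀ (arr : List Int), Dom_Maximize arr → Spec_Maximize arr (Maximize arr)

-- ===== LEMMAS AND PROOFS =====

-- the common pure value: sum of all proper suffix sums of s
def Wsum : List Int → Int
  | [] => 0
  | _ :: t => Wsum t + t.sum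

-- pure (mod-free) value of A's loop: Σ_{i<n} g i * i
def Tsum (g : Int → Int) : Nat → Int
  | 0 => 0
  | n+1 => Tsum g n + g n * n

-- Nat-indexed variants evaluated with List.getD
def TsumN (s : List Int) : Nat → Int
  | 0 => 0
  | n+1 => TsumN s n + s.getD n 0 * n

def SsumN (s : List Int) : Nat → Int
  | 0 => 0
  | n+1 => SsumN s n + s.getD n 0

-- pure (mod-free) total that B's loop adds into ans
def bval : List Int → Int → Int
  | [], _ => 0
  | v :: rest, suffix => suffix + bval rest (suffix + v)

theorem lemA (g : Int → Int) (n : Nat) (acc : Int) :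
    (PySem.List.pyRange 0 (n : Int) 1).foldl
      (fun mv i => (mv + g i * i) % 1000000007) acc
    = if n = 0 then acc else (acc + Tsum g n) % 1000000007 := by
  induction n generalizing acc with
  | zero => simp
  | succ n ih =>
      rw [show ((n + 1 : Nat) : Int) = (n : Int) + 1 from by push_cast; ring,
          PySem.List.pyRange_one_succ_right (by positivity), List.foldl_append]
      rw [ih]
      cases n with
      | zero => simp [Tsum]
      | succ m =>
          simp only [Nat.succ_ne_zero, if_false, List.foldl, Tsum]
          rw [Int.emod_add_emod]
          ring_nf

theorem tsum_eq_tsumN (s : List Int) (n : Nat) :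
    Tsum (fun i => PySem.List.pyGetD s i 0) n = TsumN s n := by
  induction n with
  | zero => rfl
  | succ n ih => simp [Tsum, TsumN, ih, PySem.List.pyGetD_natCast]

theorem ssumN_cons (a : Int) (t : List Int) (n : Nat) :
    SsumN (a :: t) (n+1) = a + SsumN t n := by
  induction n with
  | zero => simp [SsumN]
  | succ n ih =>
      rw [show SsumN (a :: t) (n+1+1) = SsumN (a :: t) (n+1) + (a :: t).getD (n+1) 0 from rfl,
          ih, List.getD_cons_succ,
          show SsumN t (n+1) = SsumN t n + t.getD n 0 from rfl]
      ring

theorem tsumN_cons (a : Int) (t : List Int) (n : Nat) :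
    TsumN (a :: t) (n+1) = TsumN t n + SsumN t n := by
  induction n with
  | zero => simp [TsumN, SsumN]
  | succ n ih =>
      rw [show TsumN (a :: t) (n+1+1) = TsumN (a :: t) (n+1) + (a :: t).getD (n+1) 0 * (↑(n+1) : Int) from rfl,
          ih, List.getD_cons_succ,
          show TsumN t (n+1) = TsumN t n + t.getD n 0 * (n : Int) from rfl,
          show SsumN t (n+1) = SsumN t n + t.getD n 0 from rfl]
      push_cast
      ring

theorem ssumN_len (t : List Int) : SsumN t t.length = t.sum := by
  induction t with
  | nil => rfl
  | cons a t ih => simp [List.length_cons, ssumN_cons, ih]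

theorem tsumN_len (s : List Int) : TsumN s s.length = Wsum s := by
  induction s with
  | nil => rfl
  | cons a t ih => simp [List.length_cons, tsumN_cons, ih, ssumN_len, Wsum]

theorem bval_affine (l : List Int) (suffix : Int) :
    bval l suffix = l.length * suffix + bval l 0 := by
  induction l generalizing suffix with
  | nil => simp [bval]
  | cons v rest ih =>
      rw [bval, ih (suffix + v), bval, ih (0 + v)]
      simp only [List.length_cons]
      push_cast
      ring

theorem pvModCollapse (a b c k : Int) :
    ((a % 1000000007) + (k * (b % 1000000007) + c)) % 1000000007
      = (a + (k * b + c)) % 1000000007 := by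
  have h1 : (b % 1000000007) ≡ b [ZMOD 1000000007] := Int.emod_emod_of_dvd _ dvd_rfl
  have h2 : (a % 1000000007) ≡ a [ZMOD 1000000007] := Int.emod_emod_of_dvd _ dvd_rfl
  exact h2.add ((h1.mul_left k).add (Int.ModEq.refl c))

theorem goSpec (l : List Int) (suffix ans : Int) :
    maximizeGo l suffix ans
      = if l = [] then ans else (ans + bval l suffix) % 1000000007 := by
  induction l generalizing suffix ans with
  | nil => rfl
  | cons v rest ih =>
      rw [maximizeGo, ih,
          PySem.Int.mod_eq_emod_of_pos (b := 1000000007) (by norm_num),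
          PySem.Int.mod_eq_emod_of_pos (b := 1000000007) (by norm_num)]
      cases rest with
      | nil => simp [bval]
      | cons w r =>
          simp only [List.cons_ne_nil, if_false]
          rw [show bval (v :: w :: r) suffix = suffix + bval (w :: r) (suffix + v) from rfl,
              bval_affine (w :: r) ((suffix + v) % 1000000007),
              bval_affine (w :: r) (suffix + v),
              pvModCollapse]
          congr 1
          ring

theorem bval_append (l : List Int) (x suffix : Int) :
    bval (l ++ [x]) suffix = bval l suffix + (suffix + l.sum) := by
  induction l generalizing suffix with
  | nil => simp [bval]
  | cons a t ih =>
      simp only [List.cons_append, bval, ih, List.sum_cons]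
      ring

theorem bval_reverse (s : List Int) : bval s.reverse 0 = Wsum s := by
  induction s with
  | nil => rfl
  | cons a t ih =>
      rw [List.reverse_cons, bval_append, ih, List.sum_reverse, Wsum]
      ring

-- ===== VERDICT (by name: the statement is the Claim_ definition above) =====
theorem Maximize_spec : Claim_equal_Maximize := by
  intro arr _dom
  unfold Spec_Maximize Maximize Maximize_alt
  simp only [PySem.List.len_eq,
    PySem.Int.mod_eq_emod_of_pos (b := 1000000007) (by norm_num)]
  set s := PySem.List.sorted arr (fun x => x) false with hs
  rw [goSpec]
  cases s with
  | nil => simp [PySem.List.pyRange_one_eq_nil]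
  | cons a t =>
      have hA := lemA (fun i => PySem.List.pyGetD (a :: t) i 0) (a :: t).length 0
      beta_reduce at hA
      rw [hA]
      simp only [List.length_cons, Nat.succ_ne_zero, if_false, List.reverse_cons]
      rw [if_neg (show t.reverse ++ [a] ≠ [] by simp),
          tsum_eq_tsumN,
          show t.length + 1 = (a :: t).length from rfl,
          tsumN_len, bval_append, bval_reverse, List.sum_reverse,
          show Wsum (a :: t) = Wsum t + t.sum from rfl]
      ring_nf
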